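-- pv_equiv track=rewrite | github.com/dudamarlena/pyc_source | pycfiles/HD44780-1.1.2.tar/utils.py | value_to_nibbles
-- ===== SOURCE A (Python) =====
-- def value_to_nibbles(value):
--     assert value >= 0
--     assert value <= 255
--     b = bin(value)[2:10]
--     b = '0' * (8 - len(b)) + b
--     bits = tuple([ bit == '1' for bit in list(b) ])
--     nibbles = (bits[:4], bits[4:])
--     return nibbles
-- ===== SOURCE B (Python) =====
-- def value_to_nibbles(value):
--     assert value >= 0
--     assert value <= 255
--     bits = tuple(((value >> (7 - i)) & 1) == 1 for i in range(8))
--     return (bits[:4], bits[4:])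
-- ===== Notes on version B (the rewrite author's own statement) =====
-- stated objective: idiomatic
-- what changed: Replaces the bin()-string formatting, zero-padding and character comparison with direct shift-and-mask bit arithmetic producing the 8 bits MSB-first.
import Mathlib
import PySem

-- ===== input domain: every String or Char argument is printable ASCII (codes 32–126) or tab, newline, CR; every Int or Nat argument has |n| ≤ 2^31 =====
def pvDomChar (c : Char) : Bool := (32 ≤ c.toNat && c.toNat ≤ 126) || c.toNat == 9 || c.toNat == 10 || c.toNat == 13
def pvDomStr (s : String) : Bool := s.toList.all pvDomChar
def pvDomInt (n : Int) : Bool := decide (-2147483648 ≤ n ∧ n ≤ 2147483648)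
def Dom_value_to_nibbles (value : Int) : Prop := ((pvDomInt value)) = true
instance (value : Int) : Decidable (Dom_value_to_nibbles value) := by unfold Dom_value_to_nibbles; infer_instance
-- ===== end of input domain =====

-- B replaces A's bin()-string formatting and zero-padding with direct shift-and-mask bit
-- arithmetic (idiomatic; same behaviour, including the two asserts).

-- ===== PORT A =====
-- b = bin(value)[2:10]; b = '0'*(8-len(b)) + b; bits = [bit == '1' ...]; (bits[:4], bits[4:])
def value_to_nibbles (value : Int) : List Bool × List Bool :=
  let b := PySem.List.slice (PySem.Int.toBinChars0b value) (some 2) (some 10)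
  let b := List.replicate (8 - b.length) '0' ++ b
  let bits := b.map (fun bit => bit == '1')
  (PySem.List.slice bits none (some 4), PySem.List.slice bits (some 4) none)

-- ===== PORT B =====
-- bits = tuple(((value >> (7 - i)) & 1) == 1 for i in range(8)); (bits[:4], bits[4:])
def value_to_nibbles_alt (value : Int) : List Bool × List Bool :=
  let bits := (PySem.List.pyRange 0 8 1).map
    (fun i => PySem.Int.band (value >>> (7 - i).toNat) 1 == 1)
  (PySem.List.slice bits none (some 4), PySem.List.slice bits (some 4) none)

-- ===== PRECONDITION & SPEC =====
-- the two asserts: A raises AssertionError unless 0 <= value <= 255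
def Pre_value_to_nibbles (value : Int) : Prop := 0 ≤ value ∧ value ≤ 255
instance (value : Int) : Decidable (Pre_value_to_nibbles value) := by unfold Pre_value_to_nibbles; infer_instance
def pvWitness_value_to_nibbles : Int := (173)
def Spec_value_to_nibbles (value : Int) (out : List Bool × List Bool) : Prop := out = value_to_nibbles_alt value
instance (value : Int) (out : List Bool × List Bool) : Decidable (Spec_value_to_nibbles value out) := by unfold Spec_value_to_nibbles; infer_instance

-- ===== CLAIM (what is proved, stated in full; the proofs are below) =====
def Claim_equal_value_to_nibbles : Prop := ∀ (value : Int), Dom_value_to_nibbles value → Pre_value_to_nibbles value → Spec_value_to_nibbles value (value_to_nibbles value)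

-- ===== LEMMAS AND PROOFS =====
set_option maxRecDepth 10000 in
theorem value_to_nibbles_eq_alt_fin :
    ∀ n : Fin 256, value_to_nibbles (n : Int) = value_to_nibbles_alt (n : Int) := by decide

-- ===== VERDICT (by name: the statement is the Claim_ definition above) =====
theorem value_to_nibbles_spec : Claim_equal_value_to_nibbles := by
  intro v _ hpre
  unfold Spec_value_to_nibbles
  obtain ⟨h0, h255⟩ := hpre
  have h := value_to_nibbles_eq_alt_fin ⟨v.toNat, by omega⟩
  simpa [Int.toNat_of_nonneg h0] using h
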